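-- pv_equiv track=rewrite | github.com/danieltheodoro/bunker | src/bootstrap/bunkerc.py | parse_generic_type_str
-- ===== SOURCE A (Python) =====
-- def parse_generic_type_str(t: str):
--     if '<' not in t: return t, []
--     base = t.split('<')[0]
--     args_str = t[len(base)+1:-1]
--     args = []
--     depth = 0
--     current = ""
--     for char in args_str:
--         if char == '<': depth += 1
--         elif char == '>': depth -= 1
--
--         if char == ',' and depth == 0:
--             args.append(current.strip())
--             current = ""
--         else:
--             current += char
--     if current: args.append(current.strip())
--     return base, args
-- ===== SOURCE B (Python) =====
-- def _split_first_top(s):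
--     depth = 0
--     for j, ch in enumerate(s):
--         if ch == '<':
--             depth += 1
--         elif ch == '>':
--             depth -= 1
--         elif ch == ',' and depth == 0:
--             return s[:j], s[j + 1:]
--     return None
--
--
-- def _top_segments(s):
--     if not s:
--         return []
--     r = _split_first_top(s)
--     if r is None:
--         return [s]
--     head, rest = r
--     return [head] + _top_segments(rest)
--
--
-- def parse_generic_type_str(t: str):
--     i = t.find('<')
--     if i == -1:
--         return t, []
--     return t[:i], [seg.strip() for seg in _top_segments(t[i + 1:-1])]
-- ===== Notes on version B (the rewrite author's own statement) =====
-- stated objective: alternative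
-- what changed: A makes one pass over the argument string with a depth counter and a growing character accumulator; B is a recursive descent that repeatedly locates the first top-level comma, slices one argument off the front, and recurses on the remainder, stripping the collected segments at the end.
import Mathlib
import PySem

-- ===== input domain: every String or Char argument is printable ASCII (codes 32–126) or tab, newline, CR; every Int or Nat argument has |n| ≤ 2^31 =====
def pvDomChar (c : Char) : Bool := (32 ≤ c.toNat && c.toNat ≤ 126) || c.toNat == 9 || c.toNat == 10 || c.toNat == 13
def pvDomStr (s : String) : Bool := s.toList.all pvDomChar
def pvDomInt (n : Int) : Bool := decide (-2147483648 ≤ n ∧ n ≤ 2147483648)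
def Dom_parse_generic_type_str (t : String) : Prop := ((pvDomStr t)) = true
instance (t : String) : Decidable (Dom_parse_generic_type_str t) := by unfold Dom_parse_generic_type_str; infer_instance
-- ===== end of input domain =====

-- B replaces A's single-pass depth-counting character accumulator with a recursive descent:
-- find the first top-level comma, split one argument off, recurse on the remainder
-- (objective: alternative decomposition, same cost).

-- ===== PORT A =====
-- the body of A's 'for char in args_str' loop; state = (args, depth, current)
def pvStepA (st : List (List Char) × Int × List Char) (char : Char) : List (List Char) × Int × List Char :=
  let depth : Int := if char = '<' then st.2.1 + 1 else if char = '>' then st.2.1 - 1 else st.2.1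
  if char = ',' ∧ depth = 0 then (st.1 ++ [PySem.Chars.strip st.2.2], depth, ([] : List Char))
  else (st.1, depth, st.2.2 ++ [char])

def parse_generic_type_str (t : String) : String × List String :=
  let tc := t.toList
  if PySem.Chars.isIn ['<'] tc = false then (t, []) else   -- if '<' not in t: return t, []
  let base := (PySem.Chars.splitOn tc ['<']).headD []      -- t.split('<')[0]
  let args_str := PySem.Chars.slice tc (some ((base.length : Int) + 1)) (some (-1))  -- t[len(base)+1:-1]
  let st := args_str.foldl pvStepA ([], 0, [])
  let args := if st.2.2 ≠ [] then st.1 ++ [PySem.Chars.strip st.2.2] else st.1  -- if current: args.append(...)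
  (String.ofList base, args.map String.ofList)

-- ===== PORT B =====
-- _split_first_top: scan for the first comma at depth 0, returning (s[:j], s[j+1:]);
-- the index/slice loop becomes the obvious structural recursion building the prefix
def pvSplitFirst (d : Int) (s : List Char) : Option (List Char × List Char) :=
  match s with
  | [] => none
  | c :: rest =>
    if c = '<' then (pvSplitFirst (d + 1) rest).map (fun p => (c :: p.1, p.2))
    else if c = '>' then (pvSplitFirst (d - 1) rest).map (fun p => (c :: p.1, p.2))
    else if c = ',' ∧ d = 0 then some ([], rest)
    else (pvSplitFirst d rest).map (fun p => (c :: p.1, p.2))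

-- termination fact the recursion of _top_segments needs
theorem pvSplitFirst_lt : ∀ (s : List Char) (d : Int) (h r : List Char),
    pvSplitFirst d s = some (h, r) → r.length < s.length := by
  intro s
  induction s with
  | nil => intro d h r hc; simp [pvSplitFirst] at hc
  | cons c rest ih =>
    intro d h r hc
    rw [pvSplitFirst] at hc
    split_ifs at hc with h1 h2 h3
    · rcases Option.map_eq_some_iff.1 hc with ⟨⟨h', r'⟩, hp, he⟩
      cases he; exact Nat.lt_succ_of_lt (ih (d + 1) h' r' hp)
    · rcases Option.map_eq_some_iff.1 hc with ⟨⟨h', r'⟩, hp, he⟩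
      cases he; exact Nat.lt_succ_of_lt (ih (d - 1) h' r' hp)
    · cases hc; simp
    · rcases Option.map_eq_some_iff.1 hc with ⟨⟨h', r'⟩, hp, he⟩
      cases he; exact Nat.lt_succ_of_lt (ih d h' r' hp)

-- _top_segments
def pvSegs (s : List Char) : List (List Char) :=
  if s = [] then []
  else
    match hr : pvSplitFirst 0 s with
    | none => [s]
    | some (hd, rest) => hd :: pvSegs rest
termination_by s.length
decreasing_by exact pvSplitFirst_lt s 0 hd rest hr

def parse_generic_type_str_alt (t : String) : String × List String :=
  let tc := t.toList
  let i := PySem.Chars.find tc ['<']                        -- i = t.find('<')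
  if i = -1 then (t, []) else                               -- if i == -1: return t, []
  (String.ofList (PySem.Chars.slice tc none (some i)),      -- t[:i]
   (pvSegs (PySem.Chars.slice tc (some (i + 1)) (some (-1)))).map
     (fun seg => String.ofList (PySem.Chars.strip seg)))    -- [seg.strip() for seg in _top_segments(t[i+1:-1])]

-- ===== PRECONDITION & SPEC =====
def Spec_parse_generic_type_str (t : String) (out : String × List String) : Prop := out = parse_generic_type_str_alt t
instance (t : String) (out : String × List String) : Decidable (Spec_parse_generic_type_str t out) := by unfold Spec_parse_generic_type_str; infer_instance

-- ===== CLAIM (what is proved, stated in full; the proofs are below) =====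
def Claim_equal_parse_generic_type_str : Prop := ∀ (t : String), Dom_parse_generic_type_str t → Spec_parse_generic_type_str t (parse_generic_type_str t)

-- ===== LEMMAS AND PROOFS =====

-- pvSegs generalized by A's pending accumulator 'cur' and running depth 'd'
def pvSegsCur (cur : List Char) (d : Int) (s : List Char) : List (List Char) :=
  match hr : pvSplitFirst d s with
  | none => if cur ++ s = [] then [] else [cur ++ s]
  | some (hd, rest) => (cur ++ hd) :: pvSegsCur [] 0 rest
termination_by s.length
decreasing_by exact pvSplitFirst_lt s d hd rest hr

-- the post-loop finish of A
def pvFinA (st : List (List Char) × Int × List Char) : List (List Char) :=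
  if st.2.2 ≠ [] then st.1 ++ [PySem.Chars.strip st.2.2] else st.1

theorem pvSegsCur_none {d : Int} {s : List Char} (h : pvSplitFirst d s = none) (cur : List Char) :
    pvSegsCur cur d s = if cur ++ s = [] then [] else [cur ++ s] := by
  rw [pvSegsCur]
  split
  · rfl
  · next hd rest heq => rw [h] at heq; cases heq

theorem pvSegsCur_some {d : Int} {s hd rest : List Char} (h : pvSplitFirst d s = some (hd, rest))
    (cur : List Char) : pvSegsCur cur d s = (cur ++ hd) :: pvSegsCur [] 0 rest := by
  rw [pvSegsCur]
  split
  · next heq => rw [h] at heq; cases heq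
  · next hd' rest' heq => rw [h] at heq; cases heq; rfl

theorem pvSegs_nil : pvSegs [] = [] := by rw [pvSegs]; simp

theorem pvSegs_none {s : List Char} (hne : s ≠ []) (h : pvSplitFirst 0 s = none) :
    pvSegs s = [s] := by
  rw [pvSegs, if_neg hne]
  split
  · rfl
  · next hd rest heq => rw [h] at heq; cases heq

theorem pvSegs_some {s hd rest : List Char} (hne : s ≠ []) (h : pvSplitFirst 0 s = some (hd, rest)) :
    pvSegs s = hd :: pvSegs rest := by
  rw [pvSegs, if_neg hne]
  split
  · next heq => rw [h] at heq; cases heq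
  · next hd' rest' heq => rw [h] at heq; cases heq; rfl

theorem pvSplitFirst_cons (c : Char) (rest : List Char) (d : Int) (h : ¬ (c = ',' ∧ d = 0)) :
    pvSplitFirst d (c :: rest)
      = (pvSplitFirst (if c = '<' then d + 1 else if c = '>' then d - 1 else d) rest).map
          (fun p => (c :: p.1, p.2)) := by
  rw [pvSplitFirst]
  by_cases h1 : c = '<'
  · simp [h1]
  · by_cases h2 : c = '>'
    · simp [h1, h2]
    · simp [h1, h2, h]

theorem pvSegsCur_cons_flush (cur rest : List Char) :
    pvSegsCur cur 0 (',' :: rest) = cur :: pvSegsCur [] 0 rest := by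
  have h : pvSplitFirst 0 (',' :: rest) = some ([], rest) := by
    rw [pvSplitFirst]; simp
  rw [pvSegsCur_some h]
  simp

theorem pvSegsCur_cons_noflush (cur : List Char) (d : Int) (c : Char) (rest : List Char)
    (h : ¬ (c = ',' ∧ d = 0)) :
    pvSegsCur cur d (c :: rest)
      = pvSegsCur (cur ++ [c]) (if c = '<' then d + 1 else if c = '>' then d - 1 else d) rest := by
  cases hr : pvSplitFirst (if c = '<' then d + 1 else if c = '>' then d - 1 else d) rest with
  | none =>
    have h0 : pvSplitFirst d (c :: rest) = none := by rw [pvSplitFirst_cons c rest d h, hr]; rfl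
    rw [pvSegsCur_none h0, pvSegsCur_none hr]
    simp
  | some p =>
    obtain ⟨hd, r⟩ := p
    have h0 : pvSplitFirst d (c :: rest) = some (c :: hd, r) := by
      rw [pvSplitFirst_cons c rest d h, hr]; rfl
    rw [pvSegsCur_some h0, pvSegsCur_some hr]
    simp

theorem pvCoreAux : ∀ (s : List Char) (args : List (List Char)) (d : Int) (cur : List Char),
    pvFinA (List.foldl pvStepA (args, d, cur) s)
      = args ++ (pvSegsCur cur d s).map PySem.Chars.strip := by
  intro s
  induction s with
  | nil =>
    intro args d cur
    rw [pvSegsCur_none (by rw [pvSplitFirst]) cur]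
    by_cases hc : cur = []
    · simp [pvFinA, hc]
    · simp [pvFinA, hc]
  | cons c rest ih =>
    intro args d cur
    by_cases hf : c = ',' ∧ d = 0
    · obtain ⟨hc, hd⟩ := hf
      subst hc; subst hd
      rw [List.foldl_cons,
        show pvStepA (args, (0 : Int), cur) ','
            = (args ++ [PySem.Chars.strip cur], (0 : Int), ([] : List Char)) by
          simp [pvStepA]]
      rw [ih, pvSegsCur_cons_flush]
      simp
    · rw [List.foldl_cons,
        show pvStepA (args, d, cur) c
            = (args, if c = '<' then d + 1 else if c = '>' then d - 1 else d, cur ++ [c]) by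
          rw [pvStepA]
          have : ¬ (c = ',' ∧ (if c = '<' then d + 1 else if c = '>' then d - 1 else d) = 0) := by
            intro ⟨h1, h2⟩
            rw [h1] at h2
            simp at h2
            exact hf ⟨h1, h2⟩
          simp only [this, if_false]]
      rw [ih, pvSegsCur_cons_noflush cur d c rest hf]

theorem pvSegs_eq : ∀ (s : List Char), pvSegsCur [] 0 s = pvSegs s := by
  intro s
  induction s using pvSegs.induct with
  | case1 => rw [pvSegs_nil, pvSegsCur_none (by rw [pvSplitFirst])]; rfl
  | case2 s hne hr => rw [pvSegs_none hne hr, pvSegsCur_none hr]; simp [hne]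
  | case3 s hne hd rest hr ih =>
    rw [pvSegs_some hne hr, pvSegsCur_some hr, ih]; rfl

-- [c] is a prefix exactly when the head is c
theorem pvPrefixSingleton (c : Char) (m : List Char) : [c] <+: m ↔ m.head? = some c := by
  cases m with
  | nil => simp
  | cons a t => simp [List.cons_prefix_iff, eq_comm]

-- takeWhile (≠ c) up to the first occurrence of c is take n
theorem pvTakeWhileEqTake (c : Char) : ∀ (l : List Char) (n : Nat),
    (l.drop n).head? = some c → (∀ j, j < n → (l.drop j).head? ≠ some c) →
    l.takeWhile (fun x => !(x == c)) = l.take n := by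
  intro l
  induction l with
  | nil => intro n h _; simp at h
  | cons a t ih =>
    intro n h hlt
    cases n with
    | zero =>
      simp at h
      simp [List.takeWhile_cons, h]
    | succ m =>
      have ha : a ≠ c := by
        intro hac
        exact hlt 0 (Nat.succ_pos m) (by simp [hac])
      have ht := ih m (by simpa using h)
        (fun j hj => by simpa using hlt (j + 1) (Nat.succ_lt_succ hj))
      simp [ha, ht]

-- head of a one-character splitOn is the prefix before the first separator
theorem pvSplitOnHeadD (c : Char) : ∀ (l : List Char),
    (l.splitOn c).headD [] = l.takeWhile (fun x => !(x == c)) := by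
  intro l
  induction l with
  | nil => simp [List.splitOn, List.splitOnP, List.splitOnP.go]
  | cons a t ih =>
    rw [List.splitOn, List.splitOnP_cons]
    by_cases hac : a = c
    · simp [hac]
    · rw [show ((a == c) = false) by simp [hac]]
      simp only [Bool.false_eq_true, if_false]
      rcases List.exists_cons_of_ne_nil (List.splitOnP_ne_nil (· == c) t) with ⟨q, qs, hq⟩
      rw [List.splitOn] at ih
      rw [hq] at ih ⊢
      simp only [List.modifyHead_cons, List.headD_cons] at ih ⊢
      simp [hac, ← ih]

-- PySem.Chars.splitOn with a one-character separator is List.splitOn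
theorem pvSplitOnGo (c : Char) : ∀ (fuel : Nat) (l cur : List Char) (acc : List (List Char)),
    l.length ≤ fuel →
    PySem.Chars.splitOn.go [c] fuel l cur acc
      = acc.reverse ++ List.modifyHead (cur.reverse ++ ·) (l.splitOn c) := by
  intro fuel
  induction fuel with
  | zero =>
    intro l cur acc h
    rw [List.length_eq_zero_iff.1 (Nat.le_zero.1 h)]
    simp [PySem.Chars.splitOn.go, List.splitOn, List.splitOnP, List.splitOnP.go]
  | succ n ih =>
    intro l cur acc h
    cases l with
    | nil => simp [PySem.Chars.splitOn.go, List.splitOn, List.splitOnP, List.splitOnP.go]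
    | cons a t =>
      rw [PySem.Chars.splitOn.go]
      have hnn : List.splitOn c t ≠ [] := List.splitOnP_ne_nil (· == c) t
      rcases List.exists_cons_of_ne_nil hnn with ⟨q, qs, hq⟩
      by_cases hac : a = c
      · subst hac
        rw [show ([a].isPrefixOf (a :: t)) = true by simp [List.isPrefixOf]]
        simp only [if_true, List.length_singleton, List.drop_succ_cons, List.drop_zero]
        rw [ih t [] (cur.reverse :: acc) (by simpa using h)]
        rw [show List.splitOn a (a :: t) = List.splitOnP (· == a) (a :: t) from rfl, List.splitOnP_cons]
        simp only [beq_self_eq_true, if_true, List.modifyHead_cons, List.reverse_cons,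
          List.append_assoc, List.append_nil]
        rw [show List.splitOnP (· == a) t = List.splitOn a t from rfl, hq]
        simp
      · rw [show ([c].isPrefixOf (a :: t)) = false by
          simp [List.isPrefixOf]; exact fun hh => hac hh.symm]
        simp only [Bool.false_eq_true, if_false]
        rw [ih t (a :: cur) acc (by simpa using h)]
        rw [show List.splitOn c (a :: t) = List.splitOnP (· == c) (a :: t) from rfl, List.splitOnP_cons]
        rw [show ((a == c) = false) by simp [hac]]
        simp only [Bool.false_eq_true, if_false]
        rw [show List.splitOnP (· == c) t = List.splitOn c t from rfl, hq]
        simp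

theorem pvSplitOn_eq (c : Char) (s : List Char) : PySem.Chars.splitOn s [c] = s.splitOn c := by
  rw [PySem.Chars.splitOn, pvSplitOnGo c (s.length + 1) s [] [] (by omega)]
  rcases List.exists_cons_of_ne_nil (List.splitOnP_ne_nil (· == c) s) with ⟨q, qs, hq⟩
  rw [show List.splitOnP (· == c) s = List.splitOn c s from rfl] at hq
  simp [hq]

-- ===== VERDICT (by name: the statement is the Claim_ definition above) =====
theorem parse_generic_type_str_spec : Claim_equal_parse_generic_type_str := by
  intro t _
  unfold Spec_parse_generic_type_str parse_generic_type_str parse_generic_type_str_alt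
  by_cases hin : PySem.Chars.isIn ['<'] t.toList = false
  · have hni : ¬ ['<'] <:+: t.toList := (PySem.Chars.isIn_eq_false_iff _ _).1 hin
    have hf : PySem.Chars.find t.toList ['<'] = -1 := (PySem.Chars.find_eq_neg_one_iff _ _).2 hni
    simp [hin, hf]
  · have hinf : ['<'] <:+: t.toList :=
      (PySem.Chars.isIn_iff_infix _ _).1 (by simpa using hin)
    have hfne : PySem.Chars.find t.toList ['<'] ≠ -1 := (PySem.Chars.find_ne_neg_one_iff _ _).2 hinf
    have hfnn : 0 ≤ PySem.Chars.find t.toList ['<'] := (PySem.Chars.find_nonneg_iff _ _).2 hinf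
    obtain ⟨hpre, hmin⟩ := PySem.Chars.find_spec hfnn
    have hhead : (t.toList.drop (PySem.Chars.find t.toList ['<']).toNat).head? = some '<' :=
      (pvPrefixSingleton _ _).1 hpre
    have hmin' : ∀ j, j < (PySem.Chars.find t.toList ['<']).toNat →
        (t.toList.drop j).head? ≠ some '<' := fun j hj hh =>
      hmin j hj ((pvPrefixSingleton _ _).2 hh)
    have hnlt : (PySem.Chars.find t.toList ['<']).toNat < t.toList.length := by
      by_contra hge
      rw [List.drop_eq_nil_iff.2 (by omega)] at hhead
      simp at hhead
    have hicast : PySem.Chars.find t.toList ['<']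
        = ((PySem.Chars.find t.toList ['<']).toNat : Int) := by omega
    rw [if_neg hin, if_neg hfne, hicast]
    have hbase : (PySem.Chars.splitOn t.toList ['<']).headD []
        = t.toList.take (PySem.Chars.find t.toList ['<']).toNat := by
      rw [pvSplitOn_eq, pvSplitOnHeadD, pvTakeWhileEqTake '<' t.toList _ hhead hmin']
    have hbase' : PySem.Chars.slice t.toList none
          (some ((PySem.Chars.find t.toList ['<']).toNat : Int))
        = t.toList.take (PySem.Chars.find t.toList ['<']).toNat := by
      rw [PySem.Chars.slice_eq_listSlice, PySem.List.slice_to _ (by omega)]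
      congr 1
    have hc := pvCoreAux (PySem.Chars.slice t.toList
      (some (((PySem.Chars.find t.toList ['<']).toNat : Int) + 1)) (some (-1))) [] 0 []
    rw [pvSegs_eq] at hc
    unfold pvFinA at hc
    simp only [hbase, List.length_take, Nat.min_eq_left (Nat.le_of_lt hnlt), hbase', hc,
      List.nil_append, List.map_map]
    rfl
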